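-- pv_equiv track=rewrite | github.com/mousetail/botc-tools | src/generate_html/svg_tools.py | estimate_proportional_length_in_pixels
-- ===== SOURCE A (Python) =====
-- def estimate_proportional_length_in_pixels(text):
--     """Estimate the length of a string in pixels for a variable-width font."""
--     # Character width mapping using sets for grouping
--     char_widths = {
--         2: set("ilftjrs"),
--         3: set(" ,!?-:;()[]{}<>@"),
--         4: set("acegknpqxyzAEFGHJKLMNPRUVW"),
--         5: set("bcdhuwvBDEHIOQSTYZ"),
--         6: set("mM"),
--         7: set("W"),
--     }
--
--     width_mapping = {
--         char: width for width, chars in char_widths.items() for char in chars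
--     }
--
--     estimated_length = sum(width_mapping.get(char, 5) for char in text)
--
--     return estimated_length
-- ===== SOURCE B (Python) =====
-- def _char_width(c):
--     # groups checked in reverse of A's overwrite order: highest-precedence first
--     for chars, width in (
--         ("W", 7),
--         ("mM", 6),
--         ("bcdhuwvBDEHIOQSTYZ", 5),
--         ("acegknpqxyzAEFGHJKLMNPRUVW", 4),
--         (" ,!?-:;()[]{}<>@", 3),
--         ("ilftjrs", 2),
--     ):
--         if c in chars:
--             return width
--     return 5
--
--
-- def estimate_proportional_length_in_pixels(text):
--     """Estimate the length of a string in pixels for a variable-width font."""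
--     counts = {}
--     for char in text:
--         counts[char] = counts.get(char, 0) + 1
--     return sum(_char_width(char) * n for char, n in counts.items())
-- ===== Notes on version B (the rewrite author's own statement) =====
-- stated objective: alternative
-- what changed: B drops A's grouped-sets-to-dict width table in favour of a direct per-character width function checked in precedence order, and sums widths weighted by a character frequency table over distinct characters instead of summing over every character of the text.
import Mathlib
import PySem

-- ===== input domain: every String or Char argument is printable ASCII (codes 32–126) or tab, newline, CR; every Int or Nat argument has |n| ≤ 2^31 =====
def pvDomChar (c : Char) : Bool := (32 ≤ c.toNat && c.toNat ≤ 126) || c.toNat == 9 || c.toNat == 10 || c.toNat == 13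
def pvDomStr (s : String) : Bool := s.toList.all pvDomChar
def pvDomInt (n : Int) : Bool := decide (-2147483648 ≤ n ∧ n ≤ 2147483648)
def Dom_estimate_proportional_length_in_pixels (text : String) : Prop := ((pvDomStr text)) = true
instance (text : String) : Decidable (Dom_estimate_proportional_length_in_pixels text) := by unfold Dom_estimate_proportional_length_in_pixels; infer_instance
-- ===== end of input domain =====

-- B replaces A's grouped-sets→dict construction and per-character sum by a per-character
-- width helper and a character frequency table summed over distinct characters (alternative decomposition).

-- ===== PORT A =====
-- char_widths = {2: set("ilftjrs"), ...}  (Int keys, sets of chars)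
def pvCharWidthsA : List (Int × PySem.Set Char) :=
  [ (2, PySem.Set.ofList "ilftjrs".toList),
    (3, PySem.Set.ofList " ,!?-:;()[]{}<>@".toList),
    (4, PySem.Set.ofList "acegknpqxyzAEFGHJKLMNPRUVW".toList),
    (5, PySem.Set.ofList "bcdhuwvBDEHIOQSTYZ".toList),
    (6, PySem.Set.ofList "mM".toList),
    (7, PySem.Set.ofList "W".toList) ]

-- {char: width for width, chars in char_widths.items() for char in chars}
def pvWidthMapping : PySem.Dict Char Int :=
  pvCharWidthsA.foldl (fun d p => p.2.foldl (fun d c => d.insert c p.1) d) PySem.Dict.empty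

-- sum(width_mapping.get(char, 5) for char in text)
def estimate_proportional_length_in_pixels (text : String) : Int :=
  text.toList.foldl (fun acc c => acc + pvWidthMapping.getD c 5) 0

-- ===== PORT B =====
-- _char_width: first matching group in reverse-precedence order, default 5
def pvCharWidthLoop (c : Char) : List (String × Int) → Int
  | [] => 5
  | (s, w) :: rest => if c ∈ s.toList then w else pvCharWidthLoop c rest

def pvGroups : List (String × Int) :=
  [ ("W", 7), ("mM", 6), ("bcdhuwvBDEHIOQSTYZ", 5),
    ("acegknpqxyzAEFGHJKLMNPRUVW", 4), (" ,!?-:;()[]{}<>@", 3), ("ilftjrs", 2) ]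

def pvCharWidth (c : Char) : Int := pvCharWidthLoop c pvGroups

-- counts = {}; for char in text: counts[char] = counts.get(char, 0) + 1
-- return sum(_char_width(char) * n for char, n in counts.items())
def estimate_proportional_length_in_pixels_alt (text : String) : Int :=
  let counts : PySem.Dict Char Int :=
    text.toList.foldl (fun d c => d.insert c (d.getD c 0 + 1)) PySem.Dict.empty
  counts.items.foldl (fun acc p => acc + pvCharWidth p.1 * p.2) 0

-- ===== PRECONDITION & SPEC =====
def Spec_estimate_proportional_length_in_pixels (text : String) (out : Int) : Prop := out = estimate_proportional_length_in_pixels_alt text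
instance (text : String) (out : Int) : Decidable (Spec_estimate_proportional_length_in_pixels text out) := by unfold Spec_estimate_proportional_length_in_pixels; infer_instance

-- ===== CLAIM (what is proved, stated in full; the proofs are below) =====
def Claim_equal_estimate_proportional_length_in_pixels : Prop := ∀ (text : String), Dom_estimate_proportional_length_in_pixels text → Spec_estimate_proportional_length_in_pixels text (estimate_proportional_length_in_pixels text)

-- ===== LEMMAS AND PROOFS =====

-- the two per-character width functions agree on every ASCII code point
set_option maxRecDepth 8192 in
theorem width_agree_ofNat : ∀ n : Nat, n < 128 →
    pvWidthMapping.getD (Char.ofNat n) 5 = pvCharWidth (Char.ofNat n) := by decide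

theorem width_agree (c : Char) (h : c.toNat < 128) :
    pvWidthMapping.getD c 5 = pvCharWidth c := by
  have := width_agree_ofNat c.toNat h
  rwa [Char.ofNat_toNat] at this

theorem sum_map_ite_zero_of_not_mem (f : Char → Int) (x : Char) (d : List Char)
    (hx : x ∉ d) : (d.map (fun k => if k = x then f k else 0)).sum = 0 := by
  induction d with
  | nil => simp
  | cons y d ih =>
    simp only [List.mem_cons, not_or] at hx
    simp [List.map_cons, Ne.symm hx.1, ih hx.2]

theorem sum_map_ite_of_mem (f : Char → Int) (x : Char) (d : List Char)
    (hd : d.Nodup) (hx : x ∈ d) :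
    (d.map (fun k => if k = x then f k else 0)).sum = f x := by
  induction d with
  | nil => simp at hx
  | cons y d ih =>
    by_cases hyx : y = x
    · subst hyx
      simp [sum_map_ite_zero_of_not_mem f y d (List.nodup_cons.mp hd).1]
    · have hxd : x ∈ d := by
        rcases List.mem_cons.mp hx with h | h
        · exact absurd h.symm hyx
        · exact h
      simp [hyx, ih (List.nodup_cons.mp hd).2 hxd]

theorem sum_mul_count (f : Char → Int) (d l : List Char)
    (hd : d.Nodup) (hsub : ∀ x ∈ l, x ∈ d) :
    (d.map (fun k => f k * (l.count k : Int))).sum = (l.map f).sum := by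
  induction l with
  | nil => simp
  | cons x l ih =>
    have hstep : ∀ k : Char,
        f k * (((x :: l).count k : Nat) : Int)
          = f k * (l.count k : Int) + (if k = x then f k else 0) := by
      intro k
      by_cases hk : k = x
      · subst hk; simp [List.count_cons_self]; ring
      · have hk' : ¬ x = k := fun h => hk h.symm
        have : (x :: l).count k = l.count k := by
          simp [hk']
        rw [this]; simp [hk]
    calc (d.map (fun k => f k * ((x :: l).count k : Int))).sum
        = (d.map (fun k => f k * (l.count k : Int) + (if k = x then f k else 0))).sum := by
          exact congrArg List.sum (List.map_congr_left (fun k _ => hstep k))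
      _ = (d.map (fun k => f k * (l.count k : Int))).sum
            + (d.map (fun k => if k = x then f k else 0)).sum := by
          simp [← List.sum_map_add]
      _ = (l.map f).sum + f x := by
          rw [ih (fun y hy => hsub y (List.mem_cons_of_mem x hy)),
              sum_map_ite_of_mem f x d hd (hsub x (List.mem_cons_self))]
      _ = ((x :: l).map f).sum := by simp [List.map_cons]; ring

-- ===== VERDICT (by name: the statement is the Claim_ definition above) =====
theorem estimate_proportional_length_in_pixels_spec : Claim_equal_estimate_proportional_length_in_pixels := by
  intro text hdom
  unfold Spec_estimate_proportional_length_in_pixels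
  unfold estimate_proportional_length_in_pixels estimate_proportional_length_in_pixels_alt
  rw [PySem.Dict.foldl_insert_getD_add_one_eq_counter]
  rw [PySem.List.foldl_add, PySem.List.foldl_add, PySem.Dict.items_counter, List.map_map]
  have hchars : ∀ c ∈ text.toList, c.toNat < 128 := by
    intro c hc
    have := List.all_eq_true.mp hdom c hc
    simp only [pvDomChar, Bool.or_eq_true, Bool.and_eq_true, decide_eq_true_eq,
      beq_iff_eq] at this
    omega
  have h1 : text.toList.map (fun c => pvWidthMapping.getD c 5)
      = text.toList.map pvCharWidth :=
    List.map_congr_left (fun c hc => width_agree c (hchars c hc))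
  rw [h1]
  have h2 := sum_mul_count pvCharWidth (PySem.Set.ofList text.toList) text.toList
    (PySem.Set.nodup_ofList _)
    (fun x hx => (PySem.Set.mem_ofList _ _).mpr hx)
  simp [Function.comp_def, h2]
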